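-- pv_equiv track=rewrite | github.com/TheScourge1/AdventOfCodePython | 2022/src/ex21.py | contains_human
-- ===== SOURCE A (Python) =====
-- def contains_human(name: str, commands: dict[str, list[str]]) -> bool:
--     command = commands[name]
--     if len(command) == 1:
--         return name == "humn"
--     elif command[0] == "humn" or command[2] == "humn":
--         return True
--     else:
--         return contains_human(command[0],commands) or contains_human(command[2],commands)
-- ===== SOURCE B (Python) =====
-- def contains_human(name: str, commands: dict[str, list[str]]) -> bool:
--     # Bottom-up fixpoint instead of top-down recursion: compute the set of keys
--     # whose subtree contains "humn", then answer by membership.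
--     if name not in commands:
--         raise KeyError(name)  # unknown monkey: same contract as the recursive version
--     reach = set()
--     changed = True
--     while changed:
--         changed = False
--         for key in commands:
--             if key in reach:
--                 continue
--             cmd = commands[key]
--             if len(cmd) == 1:
--                 hit = key == "humn"
--             elif cmd and cmd[0] == "humn":
--                 hit = True
--             else:
--                 hit = len(cmd) >= 3 and (cmd[2] == "humn" or cmd[0] in reach or cmd[2] in reach)
--             if hit:
--                 reach.add(key)
--                 changed = True
--     return name in reach
-- ===== Notes on version B (the rewrite author's own statement) =====
-- stated objective: alternative
-- what changed: Replaces A's top-down short-circuiting recursion by a bottom-up fixpoint: B repeatedly sweeps the dict to build the set of keys whose subtree contains 'humn' and answers by membership.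
import Mathlib
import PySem

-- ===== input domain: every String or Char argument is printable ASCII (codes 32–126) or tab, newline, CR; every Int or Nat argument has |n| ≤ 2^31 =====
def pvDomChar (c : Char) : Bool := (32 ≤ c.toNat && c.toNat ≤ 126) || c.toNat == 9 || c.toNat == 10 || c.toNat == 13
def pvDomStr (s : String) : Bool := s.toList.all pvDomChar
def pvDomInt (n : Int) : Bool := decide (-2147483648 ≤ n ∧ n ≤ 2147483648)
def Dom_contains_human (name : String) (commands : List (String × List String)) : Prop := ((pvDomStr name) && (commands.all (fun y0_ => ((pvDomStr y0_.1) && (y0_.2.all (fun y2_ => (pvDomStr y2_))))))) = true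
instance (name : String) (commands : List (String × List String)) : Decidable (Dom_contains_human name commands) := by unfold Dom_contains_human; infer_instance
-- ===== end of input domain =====

-- B replaces A's top-down recursion by a bottom-up fixpoint: it computes the set of keys whose
-- subtree contains "humn" and answers by membership; equivalence is about return values on Pre_
-- (A raises or diverges elsewhere).

-- index of the first entry with key s (= commands.length when absent); dict lookup is first match
def keyIdx (commands : List (String × List String)) (s : String) : Nat :=
  commands.findIdx (fun p => p.1 == s)

-- commands[name] : first-match association-list lookup (KeyError = none)
def lookupCmd (commands : List (String × List String)) (s : String) : Option (List String) :=
  if h : keyIdx commands s < commands.length then some ((commands[keyIdx commands s]'h).2) else none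

-- ===== PORT A =====
-- literal transliteration of A's recursion, fuelled (Python diverges/raises outside Pre_; fuel commands.length+1 suffices inside Pre_)
def contains_human_fuel (commands : List (String × List String)) : Nat → String → Bool
  | 0, _ => false
  | f+1, name =>
    match lookupCmd commands name with
    | none => false        -- KeyError (outside Pre_)
    | some command =>
      if command.length = 1 then name == "humn"
      else
        let c0 := command[0]?.getD ""
        if c0 == "humn" then true
        else
          let c2 := command[2]?.getD ""
          if c2 == "humn" then true
          else contains_human_fuel commands f c0 || contains_human_fuel commands f c2

def contains_human (name : String) (commands : List (String × List String)) : Bool :=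
  contains_human_fuel commands (2 * commands.length + 2) name

-- ===== PORT B =====
-- does key's entry witness "contains humn" given the already-known set H?
def hitB (commands : List (String × List String)) (H : PySem.Set String) (key : String) : Bool :=
  match lookupCmd commands key with
  | none => false
  | some cmd =>
    if cmd.length = 1 then key == "humn"
    else if cmd[0]?.getD "" == "humn" then true
    else if 3 ≤ cmd.length then
      cmd[2]?.getD "" == "humn" || PySem.Set.contains H (cmd[0]?.getD "") || PySem.Set.contains H (cmd[2]?.getD "")
    else false

-- body of B's 'for key in commands' loop
def stepB (commands : List (String × List String)) (H : PySem.Set String) (key : String) : PySem.Set String :=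
  if PySem.Set.contains H key then H
  else if hitB commands H key then PySem.Set.add H key else H

-- one full pass over the keys (B's inner for-loop)
def passB (commands : List (String × List String)) (H : PySem.Set String) : PySem.Set String :=
  commands.foldl (fun H p => stepB commands H p.1) H

-- B's 'while changed' loop: iterate passes until nothing changes (fuelled; commands.length+1 passes always reach the fixpoint)
def loopB (commands : List (String × List String)) : Nat → PySem.Set String → PySem.Set String
  | 0, H => H
  | f+1, H => let H' := passB commands H
              if H' = H then H else loopB commands f H'

def contains_human_alt (name : String) (commands : List (String × List String)) : Bool :=
  match lookupCmd commands name with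
  | none => false      -- KeyError (outside Pre_)
  | some _ => PySem.Set.contains (loopB commands (commands.length + 1) PySem.Set.empty) name

-- ===== PRECONDITION & SPEC =====
-- one well-formedness pass of the reference graph: an entry is founded once its operands are
def goodAt (commands : List (String × List String)) (G : List String) (s : String) : Bool :=
  match lookupCmd commands s with
  | none => false
  | some cmd =>
    if cmd.length = 1 then true
    else if cmd[0]?.getD "" == "humn" then true
    else if 3 ≤ cmd.length then
      cmd[2]?.getD "" == "humn" || (G.contains (cmd[0]?.getD "") && G.contains (cmd[2]?.getD ""))
    else false

-- the founded part of the graph: keys whose whole (unshort-circuited) evaluation tree is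
-- finite, KeyError-free and IndexError-free; reached as the least fixpoint of goodAt
def stageList (commands : List (String × List String)) : Nat → List String
  | 0 => []
  | k+1 => (commands.map Prod.fst).filter (fun s => goodAt commands (stageList commands k) s)

-- the keys on which A's run returns True by short-circuit: a leaf "humn", an operand "humn",
-- a True left operand, or a founded-False left operand with a True right operand
def tGood (commands : List (String × List String)) (F T : List String) (s : String) : Bool :=
  match lookupCmd commands s with
  | none => false
  | some cmd =>
    if cmd.length = 1 then s == "humn"
    else if cmd[0]?.getD "" == "humn" then true
    else if 3 ≤ cmd.length then
      cmd[2]?.getD "" == "humn" || T.contains (cmd[0]?.getD "") ||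
        (F.contains (cmd[0]?.getD "") && T.contains (cmd[2]?.getD ""))
    else false

-- the founded set is computed once and passed in (F); the lemmas below hold for every F
def trueStage (commands : List (String × List String)) (F : List String) : Nat → List String
  | 0 => []
  | k+1 => (commands.map Prod.fst).filter
      (fun s => tGood commands F (trueStage commands F k) s)

-- Pre_ excludes exactly the inputs on which A raises (KeyError, IndexError) or recurses forever:
-- name must lie in the founded part of the graph (full tree resolves) or in the set of keys whose
-- evaluation short-circuits to True before reaching a missing key, a cycle or a short command.
def Pre_contains_human (name : String) (commands : List (String × List String)) : Prop :=
  name ∈ stageList commands commands.length ∨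
    name ∈ trueStage commands (stageList commands commands.length) commands.length

instance (name : String) (commands : List (String × List String)) : Decidable (Pre_contains_human name commands) := by
  unfold Pre_contains_human; infer_instance

def pvWitness_contains_human : String × (List (String × List String)) :=
  ("root", [("root", ["a", "+", "humn"]), ("a", ["5"])])

def Spec_contains_human (name : String) (commands : List (String × List String)) (out : Bool) : Prop := out = contains_human_alt name commands
instance (name : String) (commands : List (String × List String)) (out : Bool) : Decidable (Spec_contains_human name commands out) := by unfold Spec_contains_human; infer_instance

-- ===== CLAIM (what is proved, stated in full; the proofs are below) =====
def Claim_equal_contains_human : Prop := ∀ (name : String) (commands : List (String × List String)), Dom_contains_human name commands → Pre_contains_human name commands → Spec_contains_human name commands (contains_human name commands)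

-- ===== LEMMAS AND PROOFS =====

theorem goodAt_lookup (commands : List (String × List String)) (G : List String) (s : String)
    (hg : goodAt commands G s = true) : ∃ cmd, lookupCmd commands s = some cmd := by
  unfold goodAt at hg
  cases hl : lookupCmd commands s with
  | none => rw [hl] at hg; simp at hg
  | some cmd => exact ⟨cmd, rfl⟩

-- the branching case of goodAt: the command is long enough and either op2 is humn or both operands are founded
theorem goodAt_branch (commands : List (String × List String)) (G : List String) (s : String)
    (cmd : List String) (hl : lookupCmd commands s = some cmd)
    (hg : goodAt commands G s = true)
    (h1 : ¬ cmd.length = 1) (e0 : ¬ cmd[0]?.getD "" = "humn") :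
    3 ≤ cmd.length ∧ (cmd[2]?.getD "" = "humn" ∨ (cmd[0]?.getD "" ∈ G ∧ cmd[2]?.getD "" ∈ G)) := by
  unfold goodAt at hg
  rw [hl] at hg
  simp only [h1, if_false] at hg
  rw [if_neg (by simp [e0])] at hg
  split_ifs at hg with h3
  · refine ⟨h3, ?_⟩
    simp only [Bool.or_eq_true, beq_iff_eq, Bool.and_eq_true] at hg
    rcases hg with hg | ⟨hga, hgb⟩
    · exact Or.inl hg
    · exact Or.inr ⟨by simpa using hga, by simpa using hgb⟩

-- once s is founded at stage k, A's fuelled recursion is stable for every fuel ≥ k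
theorem A_stable (commands : List (String × List String)) :
    ∀ (k : Nat) (s : String) (f f' : Nat), s ∈ stageList commands k → k ≤ f → k ≤ f' →
      contains_human_fuel commands f s = contains_human_fuel commands f' s := by
  intro k
  induction k with
  | zero => intro s f f' hs _ _; simp [stageList] at hs
  | succ k ih =>
    intro s f f' hs hf hf'
    rw [stageList, List.mem_filter] at hs
    obtain ⟨-, hg⟩ := hs
    match f, f' with
    | fa+1, fb+1 =>
      obtain ⟨cmd, hl⟩ := goodAt_lookup commands _ s hg
      rw [contains_human_fuel, contains_human_fuel, hl]
      by_cases h1 : cmd.length = 1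
      · simp [h1]
      · by_cases e0 : cmd[0]?.getD "" = "humn"
        · simp [h1, e0]
        · by_cases e2 : cmd[2]?.getD "" = "humn"
          · simp [h1, e0, e2]
          · obtain ⟨-, hch⟩ := goodAt_branch commands _ s cmd hl hg h1 e0
            rcases hch with hch | ⟨hm0, hm2⟩
            · exact absurd hch e2
            · simp [h1, e0, e2,
                ih (cmd[0]?.getD "") fa fb hm0 (by omega) (by omega),
                ih (cmd[2]?.getD "") fa fb hm2 (by omega) (by omega)]

-- one-step unfolding of A's recursion at a key that resolves
theorem A_unfold (commands : List (String × List String)) (n : Nat) (s : String)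
    (cmd : List String) (hl : lookupCmd commands s = some cmd) :
    contains_human_fuel commands (n+1) s =
      (if cmd.length = 1 then (s == "humn")
       else if cmd[0]?.getD "" == "humn" then true
       else if cmd[2]?.getD "" == "humn" then true
       else contains_human_fuel commands n (cmd[0]?.getD "")
            || contains_human_fuel commands n (cmd[2]?.getD "")) := by
  rw [contains_human_fuel, hl]

-- a successful lookup means s is one of the keys
theorem lookup_some_key (commands : List (String × List String)) (s : String)
    (cmd : List String) (hl : lookupCmd commands s = some cmd) :
    s ∈ commands.map Prod.fst := by
  unfold lookupCmd keyIdx at hl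
  split_ifs at hl with h
  have hk : (commands[List.findIdx (fun p => p.1 == s) commands]'h).1 = s := by
    have := List.findIdx_getElem (w := h)
    simpa using this
  rw [← hk]
  exact List.mem_map_of_mem (List.getElem_mem h)

-- hitB is monotone in the known set
theorem hitB_mono (commands : List (String × List String)) (H H' : PySem.Set String)
    (hsub : ∀ x, x ∈ H → x ∈ H') (s : String)
    (hh : hitB commands H s = true) : hitB commands H' s = true := by
  cases hl : lookupCmd commands s with
  | none => unfold hitB at hh; rw [hl] at hh; simp at hh
  | some cmd =>
    unfold hitB at hh ⊢
    rw [hl] at hh ⊢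
    dsimp only at hh ⊢
    split_ifs at hh ⊢ <;> try assumption
    simp only [Bool.or_eq_true, PySem.Set.contains, List.contains_iff_mem] at hh ⊢
    rcases hh with (hh | hh) | hh
    · exact Or.inl (Or.inl hh)
    · exact Or.inl (Or.inr (hsub _ hh))
    · exact Or.inr (hsub _ hh)

-- every step of B's pass only appends
theorem stepB_append (commands : List (String × List String)) (H : PySem.Set String) (key : String) :
    ∃ t, stepB commands H key = H ++ t := by
  unfold stepB
  by_cases hm : key ∈ H
  · exact ⟨[], by simp [hm]⟩
  · by_cases hh : hitB commands H key
    · exact ⟨[key], by simp [PySem.Set.add, hm, hh]⟩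
    · exact ⟨[], by simp [hm, hh]⟩

theorem passFold_append (commands l : List (String × List String)) :
    ∀ H : PySem.Set String, ∃ t, l.foldl (fun H p => stepB commands H p.1) H = H ++ t := by
  induction l with
  | nil => exact fun H => ⟨[], by simp⟩
  | cons p l ih =>
    intro H
    obtain ⟨t1, h1⟩ := stepB_append commands H p.1
    obtain ⟨t2, h2⟩ := ih (stepB commands H p.1)
    refine ⟨t1 ++ t2, ?_⟩
    rw [List.foldl_cons, h2, h1, List.append_assoc]

-- the pass invariant: every recorded key is justified by the current set
theorem inv_stepB (commands : List (String × List String)) (H : PySem.Set String)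
    (hinv : ∀ s ∈ H, hitB commands H s = true) (key : String) :
    ∀ s ∈ stepB commands H key, hitB commands (stepB commands H key) s = true := by
  obtain ⟨t, ht⟩ := stepB_append commands H key
  have hsub : ∀ x, x ∈ H → x ∈ stepB commands H key := by
    rw [ht]; exact fun x hx => List.mem_append_left _ hx
  intro s hs
  unfold stepB at hs
  by_cases hm : key ∈ H
  · rw [if_pos (show PySem.Set.contains H key = true by simpa [PySem.Set.contains] using hm)] at hs
    exact hitB_mono commands H _ hsub s (hinv s hs)
  · by_cases hh : hitB commands H key
    · have : s ∈ PySem.Set.add H key := by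
        simpa [hm, hh] using hs
      rw [PySem.Set.add, if_neg (by simpa using hm)] at this
      rcases List.mem_append.mp this with hsH | hsk
      · exact hitB_mono commands H _ hsub s (hinv s hsH)
      · have hsk : s = key := by simpa using hsk
        subst hsk
        exact hitB_mono commands H _ hsub s hh
    · rw [if_neg (show ¬ PySem.Set.contains H key = true by simpa [PySem.Set.contains] using hm),
        if_neg hh] at hs
      exact hitB_mono commands H _ hsub s (hinv s hs)

theorem inv_passFold (commands : List (String × List String)) :
    ∀ (l : List (String × List String)) (H : PySem.Set String),
      (∀ s ∈ H, hitB commands H s = true) →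
      ∀ s ∈ l.foldl (fun H p => stepB commands H p.1) H,
        hitB commands (l.foldl (fun H p => stepB commands H p.1) H) s = true := by
  intro l
  induction l with
  | nil => intro H hinv; simpa using hinv
  | cons p l ih =>
    intro H hinv
    exact ih (stepB commands H p.1) (inv_stepB commands H hinv p.1)

theorem inv_loopB (commands : List (String × List String)) :
    ∀ (f : Nat) (H : PySem.Set String),
      (∀ s ∈ H, hitB commands H s = true) →
      ∀ s ∈ loopB commands f H, hitB commands (loopB commands f H) s = true := by
  intro f
  induction f with
  | zero => intro H hinv; simpa [loopB] using hinv
  | succ f ih =>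
    intro H hinv
    rw [loopB]
    by_cases he : passB commands H = H
    · simpa [he] using hinv
    · simpa [he] using ih (passB commands H) (inv_passFold commands commands H hinv)

-- the pass keeps the set duplicate-free and inside the key set
theorem nodK_passFold (commands : List (String × List String)) :
    ∀ (l : List (String × List String)) (H : PySem.Set String),
      (∀ p ∈ l, p.1 ∈ commands.map Prod.fst) →
      H.Nodup → (∀ s ∈ H, s ∈ commands.map Prod.fst) →
      (l.foldl (fun H p => stepB commands H p.1) H).Nodup ∧
        (∀ s ∈ l.foldl (fun H p => stepB commands H p.1) H, s ∈ commands.map Prod.fst) := by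
  intro l
  induction l with
  | nil => intro H _ hn hk; exact ⟨hn, hk⟩
  | cons p l ih =>
    intro H hl hn hk
    have hstep : (stepB commands H p.1).Nodup ∧
        (∀ s ∈ stepB commands H p.1, s ∈ commands.map Prod.fst) := by
      unfold stepB
      by_cases hm : p.1 ∈ H
      · rw [if_pos (show PySem.Set.contains H p.1 = true by simpa [PySem.Set.contains] using hm)]
        exact ⟨hn, hk⟩
      · rw [if_neg (show ¬ PySem.Set.contains H p.1 = true by simpa [PySem.Set.contains] using hm)]
        by_cases hh : hitB commands H p.1
        · rw [if_pos hh, PySem.Set.add, if_neg (by simpa using hm)]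
          refine ⟨?_, ?_⟩
          · refine List.Nodup.append hn (List.nodup_singleton _) ?_
            intro a ha hb
            have : a = p.1 := by simpa using hb
            exact hm (this ▸ ha)
          · intro s hs
            rcases List.mem_append.mp hs with hsH | hsk
            · exact hk s hsH
            · have : s = p.1 := by simpa using hsk
              subst this
              exact hl p (List.mem_cons_self ..)
        · rw [if_neg hh]
          exact ⟨hn, hk⟩
    exact ih (stepB commands H p.1) (fun q hq => hl q (List.mem_cons_of_mem _ hq))
      hstep.1 hstep.2

-- a pass that changes the set makes it strictly longer
theorem passB_grow (commands : List (String × List String)) (H : PySem.Set String)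
    (hne : passB commands H ≠ H) : H.length < (passB commands H).length := by
  obtain ⟨t, ht⟩ := passFold_append commands commands H
  unfold passB at hne ⊢
  rw [ht] at hne ⊢
  cases t with
  | nil => simp at hne
  | cons a t => simp

-- with fuel commands.length + 1 the loop reaches a fixpoint of the pass
theorem loopB_fix (commands : List (String × List String)) :
    ∀ (f : Nat) (H : PySem.Set String),
      H.Nodup → (∀ s ∈ H, s ∈ commands.map Prod.fst) →
      commands.length + 1 ≤ f + H.length →
      passB commands (loopB commands f H) = loopB commands f H := by
  intro f
  induction f with
  | zero =>
    intro H hn hk hf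
    have : H.length ≤ commands.length := by
      have := (List.subperm_of_subset hn (fun x hx => hk x hx)).length_le
      simpa using this
    omega
  | succ f ih =>
    intro H hn hk hf
    rw [loopB]
    by_cases he : passB commands H = H
    · simp [he]
    · have hg := passB_grow commands H he
      have hnk := nodK_passFold commands commands H (fun p hp => List.mem_map_of_mem hp) hn hk
      simpa [he] using ih (passB commands H) hnk.1 hnk.2 (by omega)

-- at a fixpoint nothing fires: a key outside the set has a false hit
theorem stable_of_eq (commands : List (String × List String)) :
    ∀ (l : List (String × List String)) (H : PySem.Set String),
      l.foldl (fun H p => stepB commands H p.1) H = H →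
      ∀ p ∈ l, p.1 ∈ H ∨ hitB commands H p.1 = false := by
  intro l
  induction l with
  | nil => intro H _ p hp; simp at hp
  | cons q l ih =>
    intro H hfix p hp
    obtain ⟨t1, h1⟩ := stepB_append commands H q.1
    obtain ⟨t2, h2⟩ := passFold_append commands l (stepB commands H q.1)
    have hfix' : H ++ (t1 ++ t2) = H := by
      rw [← List.append_assoc, ← h1, ← h2]
      simpa [List.foldl_cons] using hfix
    have ht12 : t1 ++ t2 = [] := by
      have := congrArg List.length hfix'
      simp at this
      exact List.append_eq_nil_iff.mpr this
    have ht1 : t1 = [] := (List.append_eq_nil_iff.mp ht12).1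
    have hsfix : stepB commands H q.1 = H := by rw [h1, ht1, List.append_nil]
    rcases List.mem_cons.mp hp with rfl | hpl
    · unfold stepB at hsfix
      by_cases hm : p.1 ∈ H
      · exact Or.inl hm
      · by_cases hh : hitB commands H p.1
        · exfalso
          rw [if_neg (show ¬ PySem.Set.contains H p.1 = true by simpa [PySem.Set.contains] using hm),
            if_pos hh, PySem.Set.add, if_neg (by simpa using hm)] at hsfix
          have := congrArg List.length hsfix
          simp at this
        · exact Or.inr (by simpa using hh)
    · apply ih H _ p hpl
      rw [List.foldl_cons] at hfix
      rw [hsfix] at hfix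
      exact hfix

-- the computed fixpoint, characterised: membership coincides with a true hit (for keys)
theorem contains_F_eq (commands : List (String × List String)) (s : String)
    (cmd : List String) (hl : lookupCmd commands s = some cmd) :
    PySem.Set.contains (loopB commands (commands.length + 1) PySem.Set.empty) s =
      hitB commands (loopB commands (commands.length + 1) PySem.Set.empty) s := by
  have hfix : passB commands (loopB commands (commands.length + 1) PySem.Set.empty) =
      loopB commands (commands.length + 1) PySem.Set.empty := by
    apply loopB_fix commands (commands.length + 1) PySem.Set.empty
    · exact List.nodup_nil
    · intro s hs; simp [PySem.Set.empty] at hs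
    · simp [PySem.Set.empty]
  have hinv := inv_loopB commands (commands.length + 1) PySem.Set.empty
    (by intro s hs; simp [PySem.Set.empty] at hs)
  by_cases hb : hitB commands (loopB commands (commands.length + 1) PySem.Set.empty) s = true
  · rw [hb]
    have hkey := lookup_some_key commands s cmd hl
    obtain ⟨p, hp, hps⟩ := List.mem_map.mp hkey
    have := stable_of_eq commands commands _ hfix p hp
    rw [hps] at this
    rcases this with hm | hf
    · simpa [PySem.Set.contains] using hm
    · rw [hf] at hb; exact absurd hb (by simp)
  · rw [Bool.not_eq_true] at hb
    rw [hb]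
    by_cases hm : s ∈ loopB commands (commands.length + 1) PySem.Set.empty
    · exact absurd (hinv s hm) (by rw [hb]; simp)
    · simpa [PySem.Set.contains] using hm

-- the heart of the equivalence: on the founded part of the graph A's recursion agrees
-- with membership in B's fixpoint set
theorem A_eq_F (commands : List (String × List String)) :
    ∀ (k : Nat), k ≤ commands.length → ∀ (s : String), s ∈ stageList commands k →
      contains_human_fuel commands (2 * commands.length + 2) s =
        PySem.Set.contains (loopB commands (commands.length + 1) PySem.Set.empty) s := by
  intro k
  induction k with
  | zero => intro _ s hs; simp [stageList] at hs
  | succ k ih =>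
    intro hk s hs
    rw [stageList, List.mem_filter] at hs
    obtain ⟨-, hg⟩ := hs
    obtain ⟨cmd, hl⟩ := goodAt_lookup commands _ s hg
    rw [contains_F_eq commands s cmd hl]
    rw [show 2 * commands.length + 2 = (2 * commands.length + 1) + 1 from rfl,
      A_unfold commands (2 * commands.length + 1) s cmd hl]
    unfold hitB
    rw [hl]
    by_cases h1 : cmd.length = 1
    · simp [h1]
    · by_cases e0 : cmd[0]?.getD "" = "humn"
      · simp [h1, e0]
      · obtain ⟨h3, hch⟩ := goodAt_branch commands _ s cmd hl hg h1 e0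
        by_cases e2 : cmd[2]?.getD "" = "humn"
        · simp [h1, e0, e2, h3]
        · rcases hch with hch | ⟨hm0, hm2⟩
          · exact absurd hch e2
          · have s0 : contains_human_fuel commands (2 * commands.length + 1) (cmd[0]?.getD "")
                = contains_human_fuel commands (2 * commands.length + 2) (cmd[0]?.getD "") :=
              A_stable commands k _ _ _ hm0 (by omega) (by omega)
            have s2 : contains_human_fuel commands (2 * commands.length + 1) (cmd[2]?.getD "")
                = contains_human_fuel commands (2 * commands.length + 2) (cmd[2]?.getD "") :=
              A_stable commands k _ _ _ hm2 (by omega) (by omega)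
            have e2b : (cmd[2]?.getD "" == "humn") = false := by simpa using e2
            simp [h1, e0, e2b, h3, s0, s2, ih (by omega) _ hm0, ih (by omega) _ hm2]

-- on the short-circuit-True part of the graph A's recursion returns true (with enough fuel)
theorem T_true (commands : List (String × List String)) (F : List String) :
    ∀ (k : Nat) (s : String), s ∈ trueStage commands F k →
      ∀ (f : Nat), k + commands.length + 1 ≤ f →
        contains_human_fuel commands f s = true := by
  intro k
  induction k with
  | zero => intro s hs; simp [trueStage] at hs
  | succ k ih =>
    intro s hs f hf
    rw [trueStage, List.mem_filter] at hs
    obtain ⟨-, hg⟩ := hs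
    match f, hf with
    | f'+1, hf =>
      cases hl : lookupCmd commands s with
      | none => unfold tGood at hg; rw [hl] at hg; simp at hg
      | some cmd =>
        unfold tGood at hg
        rw [hl] at hg
        dsimp only at hg
        rw [A_unfold commands f' s cmd hl]
        by_cases h1 : cmd.length = 1
        · simpa [h1] using (by simpa [h1] using hg : (s == "humn") = true)
        · by_cases e0 : cmd[0]?.getD "" = "humn"
          · simp [h1, e0]
          · rw [if_neg h1, if_neg (by simpa using e0)] at hg
            split_ifs at hg with h3
            by_cases e2 : cmd[2]?.getD "" = "humn"
            · simp [h1, e0, e2]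
            · simp only [Bool.or_eq_true, Bool.and_eq_true, beq_iff_eq,
                List.contains_iff_mem] at hg
              rcases hg with (hg | hg) | ⟨-, hg⟩
              · exact absurd hg e2
              · have := ih (cmd[0]?.getD "") hg f' (by omega)
                simp [h1, e0, e2, this]
              · have := ih (cmd[2]?.getD "") hg f' (by omega)
                rw [if_neg h1]
                rw [if_neg (show ¬ ((cmd[0]?.getD "" == "humn") = true) by simpa using e0)]
                rw [if_neg (show ¬ ((cmd[2]?.getD "" == "humn") = true) by simpa using e2)]
                rw [this, Bool.or_true]

-- the short-circuit-True keys all end up in B's fixpoint set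
theorem T_in_F (commands : List (String × List String)) (F : List String) :
    ∀ (k : Nat) (s : String), s ∈ trueStage commands F k →
      PySem.Set.contains (loopB commands (commands.length + 1) PySem.Set.empty) s = true := by
  intro k
  induction k with
  | zero => intro s hs; simp [trueStage] at hs
  | succ k ih =>
    intro s hs
    rw [trueStage, List.mem_filter] at hs
    obtain ⟨-, hg⟩ := hs
    cases hl : lookupCmd commands s with
    | none => unfold tGood at hg; rw [hl] at hg; simp at hg
    | some cmd =>
      rw [contains_F_eq commands s cmd hl]
      unfold tGood at hg
      rw [hl] at hg
      dsimp only at hg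
      unfold hitB
      rw [hl]
      dsimp only
      by_cases h1 : cmd.length = 1
      · simpa [h1] using (by simpa [h1] using hg : (s == "humn") = true)
      · by_cases e0 : cmd[0]?.getD "" = "humn"
        · simp [h1, e0]
        · rw [if_neg h1, if_neg (by simpa using e0)] at hg
          split_ifs at hg with h3
          by_cases e2 : cmd[2]?.getD "" = "humn"
          · simp [h1, e0, e2, h3]
          · simp only [Bool.or_eq_true, Bool.and_eq_true, beq_iff_eq,
              List.contains_iff_mem] at hg
            rcases hg with (hg | hg) | ⟨-, hg⟩
            · exact absurd hg e2
            · have h0 := ih (cmd[0]?.getD "") hg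
              rw [if_neg h1, if_neg (by simpa using e0), if_pos h3]
              simp only [Bool.or_eq_true]
              exact Or.inl (Or.inr h0)
            · have h2 := ih (cmd[2]?.getD "") hg
              rw [if_neg h1, if_neg (by simpa using e0), if_pos h3]
              simp only [Bool.or_eq_true]
              exact Or.inr h2

-- ===== VERDICT (by name: the statement is the Claim_ definition above) =====
theorem contains_human_spec : Claim_equal_contains_human := by
  intro name commands _ hpre
  unfold Pre_contains_human at hpre
  have hsome : ∃ cmd, lookupCmd commands name = some cmd := by
    rcases hpre with hpre | hpre
    · cases hk : commands.length with
      | zero => rw [hk] at hpre; simp [stageList] at hpre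
      | succ m =>
        rw [hk, stageList, List.mem_filter] at hpre
        exact goodAt_lookup commands _ name hpre.2
    · cases hk : commands.length with
      | zero => rw [hk] at hpre; simp [trueStage] at hpre
      | succ m =>
        rw [hk, trueStage, List.mem_filter] at hpre
        have hg := hpre.2
        unfold tGood at hg
        cases hl : lookupCmd commands name with
        | none => rw [hl] at hg; simp at hg
        | some cmd => exact ⟨cmd, rfl⟩
  obtain ⟨cmd, hl⟩ := hsome
  unfold Spec_contains_human contains_human contains_human_alt
  rw [hl]
  rcases hpre with hpre | hpre
  · exact A_eq_F commands commands.length le_rfl name hpre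
  · rw [T_true commands _ commands.length name hpre (2 * commands.length + 2) (by omega),
      T_in_F commands _ commands.length name hpre]
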